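-- pv_equiv track=rewrite | github.com/pypi-data/pypi-mirror-147 | packages/puancore/puancore-1.6-cp39-cp39-macosx_10_9_x86_64.whl/puancore/misc/__init__.py | factacc
-- ===== SOURCE A (Python) =====
-- def factacc(P: list, n: int, c: int = 1) -> int:
--
--     """
--         "Factorial accumulate" (or "factacc" for short) is a
--         recursive function which grows exponentially with respect
--         to the numbers in P. `P` is a list of numbers, `n` and `c` is a number.
--         E.g P = [6,3,8], n = 2 and c = 1, then result is
--
--             8(6 + 3(6+1) + 1) = 224
--
--         or described with arguments
--
--             P[2](
--                 factacc(P,0,c) + factacc(P,1,c) + c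
--             )
--
--         NOTE if P=[1,1,1,1,1], then factacc(P,4) == 2**4 == 16, i.e. results
--             in [1,2,4,8,16] if iterating all i=0 up to len(P).
--
--         Return:
--             int (number)
--     """
--
--     if n <= 0:
--         return P[n]
--
--     return P[n]*(
--         sum(
--             map(lambda i: factacc(P, i, c), range(n))
--         ) + c
--     )
-- ===== SOURCE B (Python) =====
-- def factacc(P: list, n: int, c: int = 1) -> int:
--     if n <= 0:
--         return P[n]
--     s = P[0]
--     val = P[0]
--     for i in range(1, n + 1):
--         val = P[i] * (s + c)
--         s += val
--     return val
-- ===== Notes on version B (the rewrite author's own statement) =====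
-- stated objective: alternative
-- what changed: Replaced the exponential-time recursion (each call re-summing all previous calls) by a single bottom-up loop maintaining a running prefix sum of the values.
import Mathlib
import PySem

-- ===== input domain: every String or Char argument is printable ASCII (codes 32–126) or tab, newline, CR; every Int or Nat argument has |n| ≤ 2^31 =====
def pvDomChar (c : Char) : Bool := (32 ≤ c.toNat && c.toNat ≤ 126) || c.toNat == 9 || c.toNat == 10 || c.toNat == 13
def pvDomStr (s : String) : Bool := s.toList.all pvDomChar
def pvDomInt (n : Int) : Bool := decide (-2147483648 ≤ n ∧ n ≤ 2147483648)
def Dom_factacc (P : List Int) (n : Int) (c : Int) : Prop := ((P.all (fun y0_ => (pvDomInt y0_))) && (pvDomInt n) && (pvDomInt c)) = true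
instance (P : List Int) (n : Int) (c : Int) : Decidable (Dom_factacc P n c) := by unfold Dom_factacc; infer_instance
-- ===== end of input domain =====

-- B replaces A's exponential recursion by one bottom-up loop with a running prefix sum (alternative algorithm, same results).

-- ===== PORT A =====
-- P[i] with Python indexing; Pre_ guarantees the index is in range, so the default is never used there
def pyGetZ (P : List Int) (i : Int) : Int := (PySem.List.pyGet? P i).getD 0

-- A's recursion on n (for n > 0, acting on the natural number n.toNat);
-- 'sum(map(lambda i: factacc(P,i,c), range(n)))' is the sum of the recursive calls over range(n)
def factA (P : List Int) (c : Int) : Nat → Int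
  | 0 => pyGetZ P 0
  | (m+1) =>
      pyGetZ P ((m : Int) + 1) *
        (((List.range (m+1)).attach.map (fun i => factA P c i.1)).sum + c)
decreasing_by exact List.mem_range.mp i.2

def factacc (P : List Int) (n : Int) (c : Int) : Int :=
  if n ≤ 0 then pyGetZ P n else factA P c n.toNat

-- ===== PORT B =====
-- Source B's loop: state (s, val); for i in range(1, n+1): val = P[i]*(s+c); s += val
def stepB (P : List Int) (c : Int) (sv : Int × Int) (i : Int) : Int × Int :=
  let v := pyGetZ P i * (sv.1 + c)
  (sv.1 + v, v)

def factacc_alt (P : List Int) (n : Int) (c : Int) : Int :=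
  if n ≤ 0 then pyGetZ P n
  else
    let p := pyGetZ P 0
    ((PySem.List.pyRange 1 (n+1) 1).foldl (stepB P c) (p, p)).2

-- ===== PRECONDITION & SPEC =====
-- exactly the inputs where Python A returns (otherwise P[n] or P[i], 0 ≤ i ≤ n, raises IndexError)
def Pre_factacc (P : List Int) (n : Int) (c : Int) : Prop :=
  -(P.length : Int) ≤ n ∧ n < (P.length : Int)
instance (P : List Int) (n : Int) (c : Int) : Decidable (Pre_factacc P n c) := by
  unfold Pre_factacc; infer_instance

def pvWitness_factacc : List Int × Int × Int := ([6, 3, 8], 2, 1)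

def Spec_factacc (P : List Int) (n : Int) (c : Int) (out : Int) : Prop := out = factacc_alt P n c
instance (P : List Int) (n : Int) (c : Int) (out : Int) : Decidable (Spec_factacc P n c out) := by unfold Spec_factacc; infer_instance

-- ===== CLAIM (what is proved, stated in full; the proofs are below) =====
def Claim_equal_factacc : Prop := ∀ (P : List Int) (n : Int) (c : Int), Dom_factacc P n c → Pre_factacc P n c → Spec_factacc P n c (factacc P n c)

-- ===== LEMMAS AND PROOFS =====

-- prefix sum of A's values, f 0 + … + f m
def Ssum (P : List Int) (c : Int) (m : Nat) : Int :=
  ((List.range (m+1)).map (factA P c)).sum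

theorem factA_succ (P : List Int) (c : Int) (m : Nat) :
    factA P c (m+1) = pyGetZ P ((m : Int) + 1) * (Ssum P c m + c) := by
  rw [factA, Ssum]
  congr 2
  simp

theorem Ssum_succ (P : List Int) (c : Int) (m : Nat) :
    Ssum P c (m+1) = Ssum P c m + factA P c (m+1) := by
  simp [Ssum, List.range_succ, add_assoc]

-- loop invariant: after processing i = 1 … m the state is (Σ_{j≤m} f j, f m)
theorem fold_invariant (P : List Int) (c : Int) (m : Nat) :
    (PySem.List.pyRange 1 ((m : Int) + 1) 1).foldl (stepB P c) (pyGetZ P 0, pyGetZ P 0)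
      = (Ssum P c m, factA P c m) := by
  induction m with
  | zero =>
      simp [PySem.List.pyRange_one_eq_nil (by norm_num : (1:Int) ≤ 1), Ssum, factA]
  | succ k ih =>
      have h : ((k : Int) + 1 + 1) = ((k : Int) + 1) + 1 := by ring
      rw [show ((k+1 : Nat) : Int) = (k : Int) + 1 by push_cast; ring, h,
        PySem.List.pyRange_one_succ_right (by omega), List.foldl_append, ih]
      simp [stepB, Ssum_succ, factA_succ, add_comm]

-- ===== VERDICT (by name: the statement is the Claim_ definition above) =====
theorem factacc_spec : Claim_equal_factacc := by
  intro P n c _ _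
  unfold Spec_factacc factacc factacc_alt
  by_cases hn : n ≤ 0
  · simp [hn]
  · have hpos : 0 < n := lt_of_not_ge hn
    have hcast : ((n.toNat : Int)) = n := Int.toNat_of_nonneg (le_of_lt hpos)
    simp only [if_neg hn]
    rw [← hcast, fold_invariant]
    congr 2
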